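-- pv_equiv track=rewrite | github.com/cdrgray2k19/BIO | 2018Q3.py | solve
-- ===== SOURCE A (Python) =====
-- def switch(string, prev) -> list:
--         possible = []
--         change = True
--         while change:
--             change = False
--             arr = list(string)
--             for i in range(len(arr)-1):
--                 if i > 0 and (min(arr[i], arr[i+1]) < arr[i-1] < max(arr[i], arr[i+1])):
--                     arr[i], arr[i+1] = arr[i+1], arr[i]
--                     if ''.join(arr) in possible or ''.join(arr) in prev:
--                         arr[i], arr[i+1] = arr[i+1], arr[i]
--                     else:
--                         change = True
--                         possible.append(''.join(arr))
--                         break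
--                 elif i < (len(arr) - 2) and (min(arr[i], arr[i+1]) < arr[i+2] < max(arr[i], arr[i+1])):
--                     arr[i], arr[i+1] = arr[i+1], arr[i]
--                     if ''.join(arr) in possible or ''.join(arr) in prev:
--                         arr[i], arr[i+1] = arr[i+1], arr[i]
--                     else:
--                         change = True
--                         possible.append(''.join(arr))
--                         break
--         return possible
--
-- def solve(arr, prev, count) -> int:
--     arr = list(arr)
--     prev = list(prev)
--     if len(arr) == 0:
--         return count
--     new = []
--     for string in arr:
--         result = switch(string, prev)
--         for val in result:
--             new.append(val)
--             prev.append(val)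
--     return solve(tuple(new), tuple(prev), count+1)
-- ===== SOURCE B (Python) =====
-- def switch_once(s, seen):
--     # one left-to-right pass; first-eligible order matches the restart loop's discovery order
--     out = []
--     n = len(s)
--     for i in range(n - 1):
--         ok = (i > 0 and min(s[i], s[i+1]) < s[i-1] < max(s[i], s[i+1])) or \
--              (i < n - 2 and min(s[i], s[i+1]) < s[i+2] < max(s[i], s[i+1]))
--         if ok:
--             t = s[:i] + s[i+1] + s[i] + s[i+2:]
--             if t not in out and t not in seen:
--                 out.append(t)
--     return out
--
-- def solve(arr, prev, count) -> int:
--     frontier = list(arr)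
--     seen = list(prev)
--     level = count
--     while frontier:
--         base = len(seen)
--         for s in frontier:
--             seen.extend(switch_once(s, seen))
--         frontier = seen[base:]
--         level += 1
--     return level
-- ===== Notes on version B (the rewrite author's own statement) =====
-- stated objective: simpler
-- what changed: switch's restart-the-whole-scan-after-every-discovery while loop is replaced by one left-to-right pass that collects all fresh eligible swaps in the same order, and solve's tail recursion becomes an iterative frontier loop that threads a single seen list and recovers each new frontier by slicing seen.
import Mathlib
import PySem

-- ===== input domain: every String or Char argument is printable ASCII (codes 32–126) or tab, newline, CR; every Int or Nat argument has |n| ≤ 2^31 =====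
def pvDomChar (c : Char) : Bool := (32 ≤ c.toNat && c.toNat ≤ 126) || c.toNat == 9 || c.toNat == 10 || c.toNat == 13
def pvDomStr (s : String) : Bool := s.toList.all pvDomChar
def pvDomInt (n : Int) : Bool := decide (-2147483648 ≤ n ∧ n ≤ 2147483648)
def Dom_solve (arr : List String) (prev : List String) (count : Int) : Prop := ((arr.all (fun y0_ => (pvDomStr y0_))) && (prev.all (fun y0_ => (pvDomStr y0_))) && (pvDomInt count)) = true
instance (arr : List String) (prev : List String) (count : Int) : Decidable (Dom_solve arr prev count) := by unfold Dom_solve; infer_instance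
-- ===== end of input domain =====

-- B replaces switch's restart-the-scan-after-every-discovery while loop by a single left-to-right
-- pass (same discovery order) and solve's recursion by an iterative frontier loop over one seen list.

-- ===== PORT A =====
-- The for-loop of switch's while-body over the indices of range(len(arr)-1): the first adjacent
-- swap that is allowed and not already in possible/prev.  Python indices arr[i-1]/arr[i]/arr[i+1]/
-- arr[i+2] are always in range where they are read (guards 0 < i, i in range(n-1), i < n-2), so
-- List.getD is exact here.
def scanFor (l : List Char) (possible : List String) (prev : List String) : List Nat → Option String
  | [] => none
  | i :: rest =>
    if 0 < i ∧ min (l.getD i ' ') (l.getD (i+1) ' ') < l.getD (i-1) ' ' ∧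
        l.getD (i-1) ' ' < max (l.getD i ' ') (l.getD (i+1) ' ') then
      -- arr[i], arr[i+1] = arr[i+1], arr[i]; ''.join(arr)
      if String.ofList ((l.set i (l.getD (i+1) ' ')).set (i+1) (l.getD i ' ')) ∈ possible ∨
          String.ofList ((l.set i (l.getD (i+1) ' ')).set (i+1) (l.getD i ' ')) ∈ prev then
        scanFor l possible prev rest
      else some (String.ofList ((l.set i (l.getD (i+1) ' ')).set (i+1) (l.getD i ' ')))
    else if i < l.length - 2 ∧ min (l.getD i ' ') (l.getD (i+1) ' ') < l.getD (i+2) ' ' ∧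
        l.getD (i+2) ' ' < max (l.getD i ' ') (l.getD (i+1) ' ') then
      if String.ofList ((l.set i (l.getD (i+1) ' ')).set (i+1) (l.getD i ' ')) ∈ possible ∨
          String.ofList ((l.set i (l.getD (i+1) ' ')).set (i+1) (l.getD i ' ')) ∈ prev then
        scanFor l possible prev rest
      else some (String.ofList ((l.set i (l.getD (i+1) ' ')).set (i+1) (l.getD i ' ')))
    else scanFor l possible prev rest

-- lemmas cited by the ports' decreasing_by (proof infrastructure, not part of either algorithm)
theorem setswap_eq (l : List Char) (i : Nat) (h : i + 1 < l.length) :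
    (l.set i (l.getD (i+1) ' ')).set (i+1) (l.getD i ' ') =
      l.take i ++ [l.getD (i+1) ' ', l.getD i ' '] ++ l.drop (i+2) := by
  induction l generalizing i with
  | nil => simp at h
  | cons x t ih =>
    cases i with
    | zero =>
      cases t with
      | nil => simp at h
      | cons y u => simp [List.set]
    | succ j =>
      simp only [List.length_cons, Nat.add_lt_add_iff_right] at h
      have h2 := ih j h
      simp only [List.getD_eq_getElem?_getD] at h2 ⊢
      simp only [List.set_cons_succ, List.getElem?_cons_succ, List.take_succ_cons,
        List.drop_succ_cons, h2, List.cons_append]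

theorem hl_eq (l : List Char) (i : Nat) (h : i + 1 < l.length) :
    l = l.take i ++ [l.getD i ' ', l.getD (i+1) ' '] ++ l.drop (i+2) := by
  induction l generalizing i with
  | nil => simp at h
  | cons x t ih =>
    cases i with
    | zero =>
      cases t with
      | nil => simp at h
      | cons y u => simp
    | succ j =>
      simp only [List.length_cons, Nat.add_lt_add_iff_right] at h
      have h2 := ih j h
      simp only [List.getD_eq_getElem?_getD] at h2 ⊢
      simp only [List.getElem?_cons_succ, List.take_succ_cons, List.drop_succ_cons,
        List.cons_append]
      exact congrArg (x :: ·) h2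

theorem swap_perm (l : List Char) (i : Nat) (h : i + 1 < l.length) :
    (l.take i ++ [l.getD (i+1) ' ', l.getD i ' '] ++ l.drop (i+2)).Perm l := by
  conv_rhs => rw [hl_eq l i h]
  simp only [List.append_assoc, List.cons_append, List.nil_append]
  exact List.Perm.append_left _ (List.Perm.swap _ _ _)

theorem scanFor_some (l : List Char) (possible prev : List String) :
    ∀ (idxs : List Nat) (u : String), (∀ i ∈ idxs, i + 1 < l.length) →
    scanFor l possible prev idxs = some u →
    u ∉ possible ∧ u ∉ prev ∧ ∃ j ∈ idxs, j + 1 < l.length ∧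
      u = String.ofList (l.take j ++ [l.getD (j+1) ' ', l.getD j ' '] ++ l.drop (j+2)) := by
  intro idxs
  induction idxs with
  | nil => intro u _ h; cases h
  | cons i rest ih =>
    intro u hidx h
    have hn : i + 1 < l.length := hidx i (List.mem_cons_self ..)
    have hrest : ∀ j ∈ rest, j + 1 < l.length := fun j hj => hidx j (List.mem_cons_of_mem _ hj)
    simp only [scanFor] at h
    have step : ∀ (hrec : scanFor l possible prev rest = some u),
        u ∉ possible ∧ u ∉ prev ∧ ∃ j ∈ i :: rest, j + 1 < l.length ∧
          u = String.ofList (l.take j ++ [l.getD (j+1) ' ', l.getD j ' '] ++ l.drop (j+2)) := by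
      intro hrec
      obtain ⟨ha, hb, j, hj1, hj2, hj3⟩ := ih u hrest hrec
      exact ⟨ha, hb, j, List.mem_cons_of_mem _ hj1, hj2, hj3⟩
    have found : ∀ (hm : ¬ (String.ofList ((l.set i (l.getD (i+1) ' ')).set (i+1) (l.getD i ' ')) ∈ possible ∨
          String.ofList ((l.set i (l.getD (i+1) ' ')).set (i+1) (l.getD i ' ')) ∈ prev))
        (he : String.ofList ((l.set i (l.getD (i+1) ' ')).set (i+1) (l.getD i ' ')) = u),
        u ∉ possible ∧ u ∉ prev ∧ ∃ j ∈ i :: rest, j + 1 < l.length ∧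
          u = String.ofList (l.take j ++ [l.getD (j+1) ' ', l.getD j ' '] ++ l.drop (j+2)) := by
      intro hm he
      rw [setswap_eq l i hn] at hm he
      rw [not_or] at hm
      exact ⟨he ▸ hm.1, he ▸ hm.2, i, List.mem_cons_self .., hn, he.symm⟩
    split_ifs at h with hc1 hm1 hc2 hm2
    · exact step h
    · exact found hm1 (Option.some.inj h)
    · exact step h
    · exact found hm2 (Option.some.inj h)
    · exact step h

def candListA (l : List Char) : List String :=
  (List.range l.length).map
    (fun j => String.ofList (l.take j ++ [l.getD (j+1) ' ', l.getD j ' '] ++ l.drop (j+2)))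

theorem filter_length_lt {α : Type} (L : List α) (p q : α → Bool)
    (hpq : ∀ x, q x = true → p x = true) (a : α) (ha : a ∈ L) (hp : p a = true)
    (hq : ¬ q a = true) : (L.filter q).length < (L.filter p).length := by
  induction L with
  | nil => simp at ha
  | cons x t ih =>
    rcases List.mem_cons.1 ha with rfl | hat
    · rw [List.filter_cons, List.filter_cons, if_pos hp, if_neg hq]
      exact Nat.lt_succ_of_le (List.Sublist.length_le (List.monotone_filter_right t hpq))
    · rw [List.filter_cons, List.filter_cons]
      by_cases hqx : q x = true
      · rw [if_pos hqx, if_pos (hpq x hqx)]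
        simpa using ih hat
      · rw [if_neg hqx]
        by_cases hpx : p x = true
        · rw [if_pos hpx]
          exact Nat.lt_succ_of_lt (ih hat)
        · rw [if_neg hpx]
          exact ih hat

theorem candFilter_lt (l : List Char) (possible : List String) (v : String)
    (hv : v ∈ candListA l) (hvp : v ∉ possible) :
    ((candListA l).filter (fun x => decide (x ∉ possible ++ [v]))).length <
    ((candListA l).filter (fun x => decide (x ∉ possible))).length := by
  refine filter_length_lt _ _ _ (fun x hx => ?_) v hv (by simpa using hvp) (by simp)
  simp only [decide_eq_true_eq, List.mem_append, List.mem_singleton] at hx ⊢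
  exact fun hc => hx (Or.inl hc)

theorem range_lt (l : List Char) : ∀ i ∈ List.range (l.length - 1), i + 1 < l.length :=
  fun i hi => by have := List.mem_range.1 hi; omega

theorem loopA_dec (l : List Char) (possible prev : List String) (u : String)
    (h : scanFor l possible prev (List.range (l.length - 1)) = some u) :
    ((candListA l).filter (fun x => decide (x ∉ possible ++ [u]))).length <
    ((candListA l).filter (fun x => decide (x ∉ possible))).length := by
  obtain ⟨hnp, -, j, -, hj, hu⟩ := scanFor_some l possible prev _ u (range_lt l) h
  exact candFilter_lt l possible u
    (by simp only [candListA, List.mem_map, List.mem_range]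
        exact ⟨j, Nat.lt_of_succ_lt hj, hu.symm⟩) hnp

-- the while change: loop of switch; each pass rescans range(len(arr)-1) from the start and
-- appends one fresh swap to possible, or stops
def loopA (l : List Char) (prev : List String) (possible : List String) : List String :=
  match h : scanFor l possible prev (List.range (l.length - 1)) with
  | none => possible
  | some u => loopA l prev (possible ++ [u])
termination_by ((candListA l).filter (fun x => decide (x ∉ possible))).length
decreasing_by exact loopA_dec l possible prev u h

def switchA (s : String) (prev : List String) : List String := loopA s.toList prev []

-- measure infrastructure for solve's termination (proof-time only; never executed)
def pvPerms (arr : List String) : List String :=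
  arr.flatMap (fun s => s.toList.permutations.map String.ofList)

def pvCard (arr prev : List String) : Nat := ((pvPerms arr).toFinset \ prev.toFinset).card

def pvMu (arr prev : List String) : Nat := 2 * pvCard arr prev + (if arr = [] then 0 else 1)

theorem mem_pvPerms (arr : List String) (x : String) :
    x ∈ pvPerms arr ↔ ∃ s ∈ arr, x.toList.Perm s.toList := by
  unfold pvPerms
  rw [List.mem_flatMap]
  constructor
  · rintro ⟨s, hs, hx⟩
    rw [List.mem_map] at hx
    obtain ⟨m, hm, rfl⟩ := hx
    exact ⟨s, hs, by simpa using List.mem_permutations.1 hm⟩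
  · rintro ⟨s, hs, hperm⟩
    refine ⟨s, hs, ?_⟩
    rw [List.mem_map]
    exact ⟨x.toList, List.mem_permutations.2 hperm, by simp⟩

theorem loopA_none (l : List Char) (prev possible : List String)
    (h : scanFor l possible prev (List.range (l.length - 1)) = none) :
    loopA l prev possible = possible := by
  rw [loopA.eq_def]
  split
  · rfl
  · rename_i u heq
    rw [h] at heq
    cases heq

theorem loopA_some (l : List Char) (prev possible : List String) (u : String)
    (h : scanFor l possible prev (List.range (l.length - 1)) = some u) :
    loopA l prev possible = loopA l prev (possible ++ [u]) := by
  rw [loopA.eq_def]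
  split
  · rename_i heq
    rw [h] at heq
    cases heq
  · rename_i v heq
    rw [h] at heq
    injection heq with h2
    rw [h2]

theorem loopA_mem (l : List Char) (prev : List String) : ∀ (possible : List String) (u : String),
    u ∈ loopA l prev possible → u ∈ possible ∨ (u ∉ prev ∧ u.toList.Perm l) := by
  have aux : ∀ (d : Nat) (possible : List String) (u : String),
      ((candListA l).filter (fun x => decide (x ∉ possible))).length ≤ d →
      u ∈ loopA l prev possible → u ∈ possible ∨ (u ∉ prev ∧ u.toList.Perm l) := by
    intro d
    induction d with
    | zero =>
      intro possible u hd hu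
      cases hscan : scanFor l possible prev (List.range (l.length - 1)) with
      | none =>
        rw [loopA_none l prev possible hscan] at hu
        exact Or.inl hu
      | some v =>
        have hlt := loopA_dec l possible prev v hscan
        omega
    | succ d ih =>
      intro possible u hd hu
      cases hscan : scanFor l possible prev (List.range (l.length - 1)) with
      | none =>
        rw [loopA_none l prev possible hscan] at hu
        exact Or.inl hu
      | some v =>
        rw [loopA_some l prev possible v hscan] at hu
        obtain ⟨hvp, hvprev, j, -, hj, hveq⟩ := scanFor_some l possible prev _ v (range_lt l) hscan
        have hlt := loopA_dec l possible prev v hscan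
        rcases ih (possible ++ [v]) u (by omega) hu with h1 | h2
        · rcases List.mem_append.1 h1 with h1a | h1b
          · exact Or.inl h1a
          · have huv : u = v := List.mem_singleton.1 h1b
            subst huv
            refine Or.inr ⟨hvprev, ?_⟩
            rw [hveq]
            simpa using swap_perm l j hj
        · exact Or.inr h2
  intro possible u hu
  exact aux ((candListA l).filter (fun x => decide (x ∉ possible))).length possible u le_rfl hu

theorem switchA_mem (s : String) (prev : List String) (u : String)
    (hu : u ∈ switchA s prev) : u ∉ prev ∧ u.toList.Perm s.toList := by
  rcases loopA_mem s.toList prev [] u hu with h1 | h2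
  · cases h1
  · exact h2

theorem foldA_ex (arr : List String) : ∀ new0 prev0 : List String,
    ∃ Δ, arr.foldl (fun (st : List String × List String) s =>
        (st.1 ++ switchA s st.2, st.2 ++ switchA s st.2)) (new0, prev0)
      = (new0 ++ Δ, prev0 ++ Δ) ∧
      ∀ u ∈ Δ, u ∉ prev0 ∧ ∃ s ∈ arr, u.toList.Perm s.toList := by
  induction arr with
  | nil => exact fun new0 prev0 => ⟨[], by simp, by simp⟩
  | cons s t ih =>
    intro new0 prev0
    obtain ⟨Δ', h1, hprop⟩ := ih (new0 ++ switchA s prev0) (prev0 ++ switchA s prev0)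
    refine ⟨switchA s prev0 ++ Δ', ?_, ?_⟩
    · rw [List.foldl_cons]
      show List.foldl _ (new0 ++ switchA s prev0, prev0 ++ switchA s prev0) t = _
      rw [h1, List.append_assoc, List.append_assoc]
    · intro u hu
      rcases List.mem_append.1 hu with h1a | h1b
      · obtain ⟨hnp, hperm⟩ := switchA_mem s prev0 u h1a
        exact ⟨hnp, s, List.mem_cons_self .., hperm⟩
      · obtain ⟨hns, s', hs', hperm⟩ := hprop u h1b
        exact ⟨fun hc => hns (List.mem_append.2 (Or.inl hc)), s', List.mem_cons_of_mem _ hs', hperm⟩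

theorem mu_dec (arr prev Δ : List String) (harr : arr ≠ [])
    (hΔ : ∀ u ∈ Δ, u ∉ prev ∧ ∃ s ∈ arr, u.toList.Perm s.toList) :
    pvMu Δ (prev ++ Δ) < pvMu arr prev := by
  by_cases hd : Δ = []
  · subst hd
    have h0 : pvCard [] (prev ++ []) = 0 := by simp [pvCard, pvPerms]
    unfold pvMu
    rw [h0, if_neg harr]
    simp
  · have hcard : pvCard Δ (prev ++ Δ) < pvCard arr prev := by
      apply Finset.card_lt_card
      have hsub : ((pvPerms Δ).toFinset \ (prev ++ Δ).toFinset) ⊆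
          ((pvPerms arr).toFinset \ prev.toFinset) := by
        intro x hx
        rw [Finset.mem_sdiff, List.mem_toFinset, List.mem_toFinset, mem_pvPerms] at hx
        rw [Finset.mem_sdiff, List.mem_toFinset, List.mem_toFinset, mem_pvPerms]
        obtain ⟨⟨u', hu', hperm⟩, hnx⟩ := hx
        obtain ⟨-, s, hs, hps⟩ := hΔ u' hu'
        refine ⟨⟨s, hs, hperm.trans hps⟩, fun hc => hnx (List.mem_append.2 (Or.inl hc))⟩
      rw [Finset.ssubset_iff_of_subset hsub]
      obtain ⟨u0, hu0⟩ := List.exists_mem_of_ne_nil Δ hd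
      obtain ⟨hu0p, s, hs, hperm⟩ := hΔ u0 hu0
      refine ⟨u0, ?_, ?_⟩
      · rw [Finset.mem_sdiff, List.mem_toFinset, List.mem_toFinset, mem_pvPerms]
        exact ⟨⟨s, hs, hperm⟩, hu0p⟩
      · rw [Finset.mem_sdiff]
        intro hc
        exact hc.2 (List.mem_toFinset.2 (List.mem_append.2 (Or.inr hu0)))
    unfold pvMu
    rw [if_neg harr, if_neg hd]
    omega

theorem solve_dec (arr prev : List String) (h : ¬ arr.length = 0) :
    pvMu (List.foldl (fun (st : List String × List String) (x : {x // x ∈ arr}) =>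
        (st.1 ++ switchA x.val st.2, st.2 ++ switchA x.val st.2)) ([], prev) arr.attach).1
      (List.foldl (fun (st : List String × List String) (x : {x // x ∈ arr}) =>
        (st.1 ++ switchA x.val st.2, st.2 ++ switchA x.val st.2)) ([], prev) arr.attach).2 <
    pvMu arr prev := by
  obtain ⟨Δ, hΔeq, hΔ⟩ := foldA_ex arr [] prev
  have harr : arr ≠ [] := fun hc => h (by simp [hc])
  rw [List.foldl_attach (f := fun (st : List String × List String) s =>
    (st.1 ++ switchA s st.2, st.2 ++ switchA s st.2))]
  simpa [hΔeq] using mu_dec arr prev Δ harr hΔ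

def solve (arr : List String) (prev : List String) (count : Int) : Int :=
  if arr.length = 0 then count
  else
    let st := arr.foldl (fun (st : List String × List String) s =>
      (st.1 ++ switchA s st.2, st.2 ++ switchA s st.2)) ([], prev)
    solve st.1 st.2 (count + 1)
termination_by pvMu arr prev
decreasing_by exact solve_dec arr prev ‹_›

-- ===== PORT B =====
-- single left-to-right pass of Source B's switch_once over range(n-1); the slice
-- s[:i]+s[i+1]+s[i]+s[i+2:] is take/drop (exact: the indices are nonnegative and clamping
-- agrees with Python slices)
def passB (l : List Char) (seen : List String) (out : List String) : List Nat → List String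
  | [] => out
  | i :: rest =>
    if (0 < i ∧ min (l.getD i ' ') (l.getD (i+1) ' ') < l.getD (i-1) ' ' ∧
          l.getD (i-1) ' ' < max (l.getD i ' ') (l.getD (i+1) ' ')) ∨
        (i < l.length - 2 ∧ min (l.getD i ' ') (l.getD (i+1) ' ') < l.getD (i+2) ' ' ∧
          l.getD (i+2) ' ' < max (l.getD i ' ') (l.getD (i+1) ' ')) then
      if String.ofList (l.take i ++ [l.getD (i+1) ' ', l.getD i ' '] ++ l.drop (i+2)) ∉ out ∧
          String.ofList (l.take i ++ [l.getD (i+1) ' ', l.getD i ' '] ++ l.drop (i+2)) ∉ seen then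
        passB l seen
          (out ++ [String.ofList (l.take i ++ [l.getD (i+1) ' ', l.getD i ' '] ++ l.drop (i+2))])
          rest
      else passB l seen out rest
    else passB l seen out rest

def switch_once (s : String) (seen : List String) : List String :=
  passB s.toList seen [] (List.range (s.toList.length - 1))

theorem passB_mem (l : List Char) (seen : List String) : ∀ (idxs : List Nat)
    (out : List String) (u : String), (∀ i ∈ idxs, i + 1 < l.length) →
    u ∈ passB l seen out idxs → u ∈ out ∨ (u ∉ seen ∧ u.toList.Perm l) := by
  intro idxs
  induction idxs with
  | nil => intro out u _ hu; exact Or.inl hu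
  | cons i rest ih =>
    intro out u hidx hu
    have hn : i + 1 < l.length := hidx i (List.mem_cons_self ..)
    have hrest : ∀ j ∈ rest, j + 1 < l.length := fun j hj => hidx j (List.mem_cons_of_mem _ hj)
    simp only [passB] at hu
    split_ifs at hu with hok hf
    · rcases ih _ u hrest hu with h1 | h2
      · rcases List.mem_append.1 h1 with h1a | h1b
        · exact Or.inl h1a
        · have huv := List.mem_singleton.1 h1b
          subst huv
          refine Or.inr ⟨hf.2, ?_⟩
          simpa using swap_perm l i hn
      · exact Or.inr h2
    · exact ih out u hrest hu
    · exact ih out u hrest hu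

theorem switch_once_mem (s : String) (seen : List String) (u : String)
    (hu : u ∈ switch_once s seen) : u ∉ seen ∧ u.toList.Perm s.toList := by
  rcases passB_mem s.toList seen _ [] u (range_lt s.toList) hu with h1 | h2
  · cases h1
  · exact h2

theorem foldB_ex (arr : List String) : ∀ sn0 : List String,
    ∃ Δ, arr.foldl (fun sn s => sn ++ switch_once s sn) sn0 = sn0 ++ Δ ∧
      ∀ u ∈ Δ, u ∉ sn0 ∧ ∃ s ∈ arr, u.toList.Perm s.toList := by
  induction arr with
  | nil => exact fun sn0 => ⟨[], by simp, by simp⟩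
  | cons s t ih =>
    intro sn0
    obtain ⟨Δ', h1, hprop⟩ := ih (sn0 ++ switch_once s sn0)
    refine ⟨switch_once s sn0 ++ Δ', ?_, ?_⟩
    · rw [List.foldl_cons]
      show List.foldl _ (sn0 ++ switch_once s sn0) t = _
      rw [h1, List.append_assoc]
    · intro u hu
      rcases List.mem_append.1 hu with h1a | h1b
      · obtain ⟨hns, hperm⟩ := switch_once_mem s sn0 u h1a
        exact ⟨hns, s, List.mem_cons_self .., hperm⟩
      · obtain ⟨hns, s', hs', hperm⟩ := hprop u h1b
        exact ⟨fun hc => hns (List.mem_append.2 (Or.inl hc)), s', List.mem_cons_of_mem _ hs', hperm⟩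

theorem solveB_dec (frontier seen : List String) (h : ¬ frontier = []) :
    pvMu ((List.foldl (fun sn (x : {x // x ∈ frontier}) => sn ++ switch_once x.val sn)
        seen frontier.attach).drop seen.length)
      (List.foldl (fun sn (x : {x // x ∈ frontier}) => sn ++ switch_once x.val sn)
        seen frontier.attach) < pvMu frontier seen := by
  rw [List.foldl_attach (f := fun sn s => sn ++ switch_once s sn)]
  obtain ⟨Δ, hΔeq, hΔ⟩ := foldB_ex frontier seen
  simpa [hΔeq, List.drop_left] using mu_dec frontier seen Δ h hΔ

-- the while frontier: loop of Source B's solve; the new frontier is seen[base:]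
def solveLoopB (frontier : List String) (seen : List String) (level : Int) : Int :=
  if frontier = [] then level
  else
    let seen' := frontier.foldl (fun sn s => sn ++ switch_once s sn) seen
    solveLoopB (seen'.drop seen.length) seen' (level + 1)
termination_by pvMu frontier seen
decreasing_by exact solveB_dec frontier seen ‹_›

def solve_alt (arr : List String) (prev : List String) (count : Int) : Int :=
  solveLoopB arr prev count

-- ===== PRECONDITION & SPEC =====
def Spec_solve (arr : List String) (prev : List String) (count : Int) (out : Int) : Prop := out = solve_alt arr prev count
instance (arr : List String) (prev : List String) (count : Int) (out : Int) : Decidable (Spec_solve arr prev count out) := by unfold Spec_solve; infer_instance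

-- ===== CLAIM (what is proved, stated in full; the proofs are below) =====
def Claim_equal_solve : Prop := ∀ (arr : List String) (prev : List String) (count : Int), Dom_solve arr prev count → Spec_solve arr prev count (solve arr prev count)

-- ===== LEMMAS AND PROOFS =====
-- the candidate swap at index j, and the eligibility predicate shared by both scans
def tstr (l : List Char) (j : Nat) : String :=
  String.ofList (l.take j ++ [l.getD (j+1) ' ', l.getD j ' '] ++ l.drop (j+2))

def okP (l : List Char) (j : Nat) : Prop :=
  (0 < j ∧ min (l.getD j ' ') (l.getD (j+1) ' ') < l.getD (j-1) ' ' ∧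
      l.getD (j-1) ' ' < max (l.getD j ' ') (l.getD (j+1) ' ')) ∨
  (j < l.length - 2 ∧ min (l.getD j ' ') (l.getD (j+1) ' ') < l.getD (j+2) ' ' ∧
      l.getD (j+2) ' ' < max (l.getD j ' ') (l.getD (j+1) ' '))

def eligP (l : List Char) (prev p : List String) (j : Nat) : Prop :=
  okP l j ∧ tstr l j ∉ p ∧ tstr l j ∉ prev

theorem elig_append (l : List Char) (prev p q : List String) (j : Nat)
    (h : ¬ eligP l prev p j) : ¬ eligP l prev (p ++ q) j :=
  fun he => h ⟨he.1, fun hc => he.2.1 (List.mem_append.2 (Or.inl hc)), he.2.2⟩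

theorem scan_hit (l : List Char) (prev p : List String) (j : Nat) (rest : List Nat)
    (hn : j + 1 < l.length) (he : eligP l prev p j) :
    scanFor l p prev (j :: rest) = some (tstr l j) := by
  obtain ⟨hok, hp, hpr⟩ := he
  have hset : String.ofList ((l.set j (l.getD (j+1) ' ')).set (j+1) (l.getD j ' ')) = tstr l j := by
    rw [setswap_eq l j hn]; rfl
  simp only [scanFor]
  by_cases hc1 : 0 < j ∧ min (l.getD j ' ') (l.getD (j+1) ' ') < l.getD (j-1) ' ' ∧
      l.getD (j-1) ' ' < max (l.getD j ' ') (l.getD (j+1) ' ')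
  · rw [if_pos hc1, hset, if_neg (not_or.2 ⟨hp, hpr⟩)]
  · have hc2 := (hok : okP l j).resolve_left hc1
    rw [if_neg hc1, if_pos hc2, hset, if_neg (not_or.2 ⟨hp, hpr⟩)]

theorem scan_skip (l : List Char) (prev p : List String) (j : Nat) (rest : List Nat)
    (hn : j + 1 < l.length) (he : ¬ eligP l prev p j) :
    scanFor l p prev (j :: rest) = scanFor l p prev rest := by
  have hset : String.ofList ((l.set j (l.getD (j+1) ' ')).set (j+1) (l.getD j ' ')) = tstr l j := by
    rw [setswap_eq l j hn]; rfl
  simp only [scanFor]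
  by_cases hc1 : 0 < j ∧ min (l.getD j ' ') (l.getD (j+1) ' ') < l.getD (j-1) ' ' ∧
      l.getD (j-1) ' ' < max (l.getD j ' ') (l.getD (j+1) ' ')
  · rw [if_pos hc1, hset]
    have hmem : tstr l j ∈ p ∨ tstr l j ∈ prev := by
      by_contra hc
      rw [not_or] at hc
      exact he ⟨Or.inl hc1, hc.1, hc.2⟩
    rw [if_pos hmem]
  · rw [if_neg hc1]
    by_cases hc2 : j < l.length - 2 ∧ min (l.getD j ' ') (l.getD (j+1) ' ') < l.getD (j+2) ' ' ∧
        l.getD (j+2) ' ' < max (l.getD j ' ') (l.getD (j+1) ' ')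
    · rw [if_pos hc2, hset]
      have hmem : tstr l j ∈ p ∨ tstr l j ∈ prev := by
        by_contra hc
        rw [not_or] at hc
        exact he ⟨Or.inr hc2, hc.1, hc.2⟩
      rw [if_pos hmem]
    · rw [if_neg hc2]

theorem scan_skipAll (l : List Char) (prev p : List String) : ∀ (xs ys : List Nat),
    (∀ j ∈ xs, j + 1 < l.length) → (∀ j ∈ xs, ¬ eligP l prev p j) →
    scanFor l p prev (xs ++ ys) = scanFor l p prev ys := by
  intro xs
  induction xs with
  | nil => intro ys _ _; rfl
  | cons j rest ih =>
    intro ys hn he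
    rw [List.cons_append,
      scan_skip l prev p j (rest ++ ys) (hn j (List.mem_cons_self ..)) (he j (List.mem_cons_self ..))]
    exact ih ys (fun k hk => hn k (List.mem_cons_of_mem _ hk))
      (fun k hk => he k (List.mem_cons_of_mem _ hk))

-- passB unfolding lemmas
theorem passB_add (l : List Char) (seen out : List String) (i : Nat) (rest : List Nat)
    (he : eligP l seen out i) :
    passB l seen out (i :: rest) = passB l seen (out ++ [tstr l i]) rest := by
  have hok : (0 < i ∧ min (l.getD i ' ') (l.getD (i+1) ' ') < l.getD (i-1) ' ' ∧
        l.getD (i-1) ' ' < max (l.getD i ' ') (l.getD (i+1) ' ')) ∨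
      (i < l.length - 2 ∧ min (l.getD i ' ') (l.getD (i+1) ' ') < l.getD (i+2) ' ' ∧
        l.getD (i+2) ' ' < max (l.getD i ' ') (l.getD (i+1) ' ')) := he.1
  have hf : String.ofList (l.take i ++ [l.getD (i+1) ' ', l.getD i ' '] ++ l.drop (i+2)) ∉ out ∧
      String.ofList (l.take i ++ [l.getD (i+1) ' ', l.getD i ' '] ++ l.drop (i+2)) ∉ seen :=
    ⟨he.2.1, he.2.2⟩
  simp only [passB]
  rw [if_pos hok, if_pos hf]
  rfl

theorem passB_skip (l : List Char) (seen out : List String) (i : Nat) (rest : List Nat)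
    (he : ¬ eligP l seen out i) :
    passB l seen out (i :: rest) = passB l seen out rest := by
  simp only [passB]
  by_cases hok : (0 < i ∧ min (l.getD i ' ') (l.getD (i+1) ' ') < l.getD (i-1) ' ' ∧
        l.getD (i-1) ' ' < max (l.getD i ' ') (l.getD (i+1) ' ')) ∨
      (i < l.length - 2 ∧ min (l.getD i ' ') (l.getD (i+1) ' ') < l.getD (i+2) ' ' ∧
        l.getD (i+2) ' ' < max (l.getD i ' ') (l.getD (i+1) ' '))
  · rw [if_pos hok]
    have hmem : ¬ (String.ofList (l.take i ++ [l.getD (i+1) ' ', l.getD i ' '] ++ l.drop (i+2)) ∉ out ∧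
        String.ofList (l.take i ++ [l.getD (i+1) ' ', l.getD i ' '] ++ l.drop (i+2)) ∉ seen) :=
      fun hc => he ⟨hok, hc.1, hc.2⟩
    rw [if_neg hmem]
  · rw [if_neg hok]

-- the core: the restart loop of A equals the single pass of B
theorem loop_eq_pass (l : List Char) (prev : List String) : ∀ (k i : Nat) (p : List String),
    l.length - 1 = i + k → (∀ j, j < i → ¬ eligP l prev p j) →
    loopA l prev p = passB l prev p (List.range' i k) := by
  intro k
  induction k with
  | zero =>
    intro i p hik hcl
    show loopA l prev p = p
    refine loopA_none l prev p ?_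
    rw [List.range_eq_range', show List.range' 0 (l.length - 1) = List.range' 0 (l.length - 1) ++ [] by simp]
    rw [scan_skipAll l prev p (List.range' 0 (l.length - 1)) []
      (fun j hj => by have := List.mem_range'_1.1 hj; omega)
      (fun j hj => by have := List.mem_range'_1.1 hj; exact hcl j (by omega))]
    rfl
  | succ k ih =>
    intro i p hik hcl
    have hn : i + 1 < l.length := by omega
    rw [List.range'_succ]
    by_cases he : eligP l prev p i
    · rw [passB_add l prev p i (List.range' (i+1) k) he]
      have hscan : scanFor l p prev (List.range (l.length - 1)) = some (tstr l i) := by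
        rw [List.range_eq_range',
          show List.range' 0 (l.length - 1) = List.range' 0 i ++ List.range' i (k+1) by
            rw [show List.range' i (k+1) = List.range' (0 + 1 * i) (k+1) by simp]
            rw [List.range'_append]
            rw [hik]]
        rw [scan_skipAll l prev p (List.range' 0 i) (List.range' i (k+1))
          (fun j hj => by have := List.mem_range'_1.1 hj; omega)
          (fun j hj => by have := List.mem_range'_1.1 hj; exact hcl j (by omega))]
        rw [List.range'_succ]
        exact scan_hit l prev p i (List.range' (i+1) k) hn he
      rw [loopA_some l prev p (tstr l i) hscan]
      refine ih (i+1) (p ++ [tstr l i]) (by omega) (fun j hj => ?_)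
      rcases Nat.lt_succ_iff_lt_or_eq.1 hj with h1 | h1
      · exact elig_append l prev p [tstr l i] j (hcl j h1)
      · subst h1
        intro hel
        exact hel.2.1 (List.mem_append.2 (Or.inr (List.mem_singleton.2 rfl)))
    · rw [passB_skip l prev p i (List.range' (i+1) k) he]
      refine ih (i+1) p (by omega) (fun j hj => ?_)
      rcases Nat.lt_succ_iff_lt_or_eq.1 hj with h1 | h1
      · exact hcl j h1
      · subst h1; exact he

theorem switch_eq (s : String) (prev : List String) : switchA s prev = switch_once s prev := by
  unfold switchA switch_once
  rw [List.range_eq_range']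
  exact loop_eq_pass s.toList prev (s.toList.length - 1) 0 [] (Nat.zero_add _).symm
    (fun j hj => absurd hj (Nat.not_lt_zero j))

theorem foldAB (arr : List String) : ∀ new0 prev0 : List String,
    ∃ Δ, arr.foldl (fun (st : List String × List String) s =>
        (st.1 ++ switchA s st.2, st.2 ++ switchA s st.2)) (new0, prev0) = (new0 ++ Δ, prev0 ++ Δ) ∧
      arr.foldl (fun sn s => sn ++ switch_once s sn) prev0 = prev0 ++ Δ := by
  induction arr with
  | nil => exact fun new0 prev0 => ⟨[], by simp, by simp⟩
  | cons s t ih =>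
    intro new0 prev0
    obtain ⟨Δ', h1, h2⟩ := ih (new0 ++ switchA s prev0) (prev0 ++ switchA s prev0)
    refine ⟨switchA s prev0 ++ Δ', ?_, ?_⟩
    · rw [List.foldl_cons]
      show List.foldl _ (new0 ++ switchA s prev0, prev0 ++ switchA s prev0) t = _
      rw [h1, List.append_assoc, List.append_assoc]
    · rw [List.foldl_cons]
      show List.foldl _ (prev0 ++ switch_once s prev0) t = _
      rw [← switch_eq s prev0, h2, List.append_assoc]

theorem solve_eq_aux : ∀ (N : Nat) (arr prev : List String) (count : Int),
    pvMu arr prev ≤ N → solve arr prev count = solveLoopB arr prev count := by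
  intro N
  induction N with
  | zero =>
    intro arr prev count hle
    have harr : arr = [] := by
      by_contra hc
      have h1 : pvMu arr prev ≥ 1 := by unfold pvMu; rw [if_neg hc]; omega
      omega
    subst harr
    rw [solve.eq_def, solveLoopB.eq_def]
    simp
  | succ N ih =>
    intro arr prev count hle
    by_cases harr : arr = []
    · subst harr
      rw [solve.eq_def, solveLoopB.eq_def]
      simp
    · obtain ⟨Δ, h1, h2⟩ := foldAB arr [] prev
      obtain ⟨Δ2, h1b, hprop⟩ := foldA_ex arr [] prev
      have hΔΔ : Δ2 = Δ := by
        have h3 := h1b.symm.trans h1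
        simpa using congrArg Prod.fst h3
      rw [hΔΔ] at hprop
      rw [solve.eq_def, solveLoopB.eq_def]
      rw [if_neg (fun hc => harr (List.length_eq_zero_iff.1 hc)), if_neg harr]
      simp only [h1, h2, List.nil_append, List.drop_left]
      exact ih Δ (prev ++ Δ) (count + 1) (by
        have h4 := mu_dec arr prev Δ harr hprop
        omega)

theorem solve_eq (arr prev : List String) (count : Int) :
    solve arr prev count = solve_alt arr prev count :=
  solve_eq_aux (pvMu arr prev) arr prev count le_rfl

-- ===== VERDICT (by name: the statement is the Claim_ definition above) =====
theorem solve_spec : Claim_equal_solve := by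
  intro arr prev count _
  unfold Spec_solve
  exact solve_eq arr prev count
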